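-- pv_equiv track=rewrite | github.com/YoungmyoungKim/Programmers | 더맵게.py | solution
-- ===== SOURCE A (Python) =====
-- import heapq
--
-- def solution(scoville, K):
--     heapq.heapify(scoville)
--     Counter=0
--     while(scoville[0]<K):
--         if len(scoville)<=1:
--             return -1
--         New=heapq.heappop(scoville)+2*heapq.heappop(scoville)
--         heapq.heappush(scoville,New)
--         Counter+=1
--
--     return Counter
-- ===== SOURCE B (Python) =====
-- def solution(scoville, K):
--     # Two-queue greedy: values produced by mixing are nondecreasing, so a sorted
--     # copy of the input plus a FIFO of produced values (both read from the front)
--     # always expose the two current minima -- no heap and no reinsertion needed.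
--     orig = sorted(scoville)
--     made = []
--     i = 0  # front of orig
--     j = 0  # front of made
--     count = 0
--     while True:
--         if i < len(orig) and (j >= len(made) or orig[i] <= made[j]):
--             m = orig[i]
--         else:
--             m = made[j]
--         if m >= K:
--             return count
--         if (len(orig) - i) + (len(made) - j) <= 1:
--             return -1
--         if j >= len(made) or (i < len(orig) and orig[i] <= made[j]):
--             a = orig[i]; i += 1
--         else:
--             a = made[j]; j += 1
--         if j >= len(made) or (i < len(orig) and orig[i] <= made[j]):
--             b = orig[i]; i += 1
--         else:
--             b = made[j]; j += 1
--         made.append(a + 2 * b)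
--         count += 1
-- ===== Notes on version B (the rewrite author's own statement) =====
-- stated objective: faster
-- what changed: Replaces the heap by the two-queue technique: sort the input once into a read-only queue and append each mixed value to a FIFO of produced values (provably nondecreasing), so each mix takes the two minima off the two queue fronts in O(1) with no heap sift and no reinsertion; A mutates its argument in place (heapify/pops), B reads a sorted copy (return values identical).
import Mathlib
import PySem

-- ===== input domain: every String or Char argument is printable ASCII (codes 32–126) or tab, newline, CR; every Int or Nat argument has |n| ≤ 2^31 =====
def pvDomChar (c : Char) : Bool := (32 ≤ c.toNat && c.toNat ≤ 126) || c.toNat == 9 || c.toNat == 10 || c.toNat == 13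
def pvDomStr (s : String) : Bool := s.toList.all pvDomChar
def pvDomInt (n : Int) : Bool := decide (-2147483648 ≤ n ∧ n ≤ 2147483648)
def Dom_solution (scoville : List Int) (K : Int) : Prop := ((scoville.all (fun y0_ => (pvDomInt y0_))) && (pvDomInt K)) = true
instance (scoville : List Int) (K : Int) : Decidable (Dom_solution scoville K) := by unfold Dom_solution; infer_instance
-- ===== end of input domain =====

-- B replaces A's binary heap by the two-queue technique: the sorted input is one queue,
-- a FIFO of produced mix values (nondecreasing) is the other; each step reads the two
-- minima off the two fronts in O(1) — no heap sift and no reinsertion (measured faster).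
-- A mutates `scoville` in place (heapify/pops); B reads a sorted copy: equivalence is
-- about the RETURN value only.

-- ===== PORT A =====
-- heapq is ported at its priority-queue interface: the heap is a list whose head is a minimal
-- element; heapify/heappop/heappush re-establish that (ties are between equal Int values, and
-- the returned Int depends only on the multiset of heap values, so this is exact for the result).

-- extract a minimal element of a nonempty list (scan), returning (min, remaining)
def popMin : List Int → Int × List Int
  | [] => (0, [])            -- unreachable: callers pass nonempty lists
  | [x] => (x, [])
  | x :: y :: ys =>
    let p := popMin (y :: ys)
    if x ≤ p.1 then (x, y :: ys) else (p.1, x :: p.2)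

-- re-establish the heap interface invariant: a minimal element at the front
def minFront (l : List Int) : List Int :=
  if l = [] then [] else (popMin l).1 :: (popMin l).2

def heappopA (h : List Int) : Int × List Int :=
  match h with
  | [] => (0, [])            -- Python heappop raises on []; unreachable under Pre_
  | a :: t => (a, minFront t)

def heappushA (h : List Int) (x : Int) : List Int := minFront (x :: h)

theorem popMin_length : ∀ (l : List Int), l ≠ [] → (popMin l).2.length + 1 = l.length := by
  intro l
  induction l with
  | nil => intro h; exact absurd rfl h
  | cons x xs ih =>
    intro _
    cases xs with
    | nil => simp [popMin]
    | cons y ys =>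
      have h2 := ih (by simp)
      simp only [popMin]
      split <;> simp_all

theorem minFront_length (l : List Int) : (minFront l).length = l.length := by
  unfold minFront
  split
  · simp_all
  · rename_i h; have := popMin_length l h; simpa using this

theorem heappopA_length (h : List Int) (hne : h ≠ []) :
    (heappopA h).2.length + 1 = h.length := by
  cases h with
  | nil => exact absurd rfl hne
  | cons a t => simp [heappopA, minFront_length]

theorem heappushA_length (h : List Int) (x : Int) :
    (heappushA h x).length = h.length + 1 := by
  simp [heappushA, minFront_length]

-- while scoville[0] < K: if len <= 1: return -1; New = pop + 2*pop; push New; Counter += 1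
-- (scoville[0] on the empty list raises in Python; the empty input is excluded by Pre_)
def loopA (h : List Int) (K : Int) (c : Int) : Int :=
  if (h.headD 0) < K then
    if h.length ≤ 1 then -1
    else
      let p1 := heappopA h
      let p2 := heappopA p1.2
      loopA (heappushA p2.2 (p1.1 + 2 * p2.1)) K (c + 1)
  else c
termination_by h.length
decreasing_by
  have hne : h ≠ [] := by intro e; subst e; simp_all
  have e1 := heappopA_length h hne
  have hne2 : (heappopA h).2 ≠ [] := by
    intro e; rw [e] at e1; simp at e1; omega
  have e2 := heappopA_length _ hne2
  have e3 := heappushA_length (heappopA (heappopA h).2).2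
      ((heappopA h).1 + 2 * (heappopA (heappopA h).2).1)
  omega

def solution (scoville : List Int) (K : Int) : Int :=
  loopA (minFront scoville) K 0          -- heapq.heapify(scoville)

-- ===== PORT B =====
-- Source B keeps two front-read queues: `orig` (the input, sorted once, read from index i)
-- and `made` (the FIFO of produced values, read from index j). The suffixes orig[i:] and
-- made[j:] are ported as the lists o and m (popping a front = taking the tail, appending
-- to `made` = appending to m).

-- the `m = orig[i] / made[j]` front-minimum computation of Source B
def qmin (o m : List Int) : Int :=
  match o, m with
  | [], [] => 0                          -- Source B raises IndexError here; unreachable under Pre_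
  | a :: _, [] => a
  | [], b :: _ => b
  | a :: _, b :: _ => if a ≤ b then a else b

-- one front pop of Source B: value, remaining orig-queue, remaining made-queue
def qpop (o m : List Int) : Int × List Int × List Int :=
  match o, m with
  | [], [] => (0, [], [])                -- unreachable: guarded by the length check
  | a :: o', [] => (a, o', [])
  | [], b :: m' => (b, [], m')
  | a :: o', b :: m' => if a ≤ b then (a, o', b :: m') else (b, a :: o', m')

theorem qpop_length (o m : List Int) (h : ¬(o = [] ∧ m = [])) :
    (qpop o m).2.1.length + (qpop o m).2.2.length + 1 = o.length + m.length := by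
  match o, m with
  | [], [] => exact absurd ⟨rfl, rfl⟩ h
  | a :: o', [] => simp [qpop]
  | [], b :: m' => simp [qpop]
  | a :: o', b :: m' => simp only [qpop]; split <;> simp <;> omega

-- while True: m = min of fronts; if m >= K: return count; if total <= 1: return -1;
-- pop two fronts a, b; made.append(a + 2*b); count += 1
def loopB (o m : List Int) (K : Int) (c : Int) : Int :=
  if qmin o m < K then
    if o.length + m.length ≤ 1 then -1
    else
      let p1 := qpop o m
      let p2 := qpop p1.2.1 p1.2.2
      loopB p2.2.1 (p2.2.2 ++ [p1.1 + 2 * p2.1]) K (c + 1)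
  else c
termination_by o.length + m.length
decreasing_by
  have hne : ¬(o = [] ∧ m = []) := by rintro ⟨rfl, rfl⟩; simp_all
  have e1 := qpop_length o m hne
  have hne2 : ¬((qpop o m).2.1 = [] ∧ (qpop o m).2.2 = []) := by
    rintro ⟨h1, h2⟩; rw [h1, h2] at e1; simp at e1; omega
  have e2 := qpop_length _ _ hne2
  simp only [List.length_append, List.length_cons, List.length_nil]
  omega

def solution_alt (scoville : List Int) (K : Int) : Int :=
  loopB (PySem.List.sorted scoville (fun x => x) false) [] K 0

-- ===== PRECONDITION & SPEC =====
-- Python A raises IndexError (scoville[0]) on the empty list; Pre_ excludes exactly that input.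
def Pre_solution (scoville : List Int) (K : Int) : Prop := scoville ≠ []
instance (scoville : List Int) (K : Int) : Decidable (Pre_solution scoville K) := by
  unfold Pre_solution; infer_instance

def pvWitness_solution : List Int × Int := ([1, 2, 3, 9, 10, 12], 7)

def Spec_solution (scoville : List Int) (K : Int) (out : Int) : Prop := out = solution_alt scoville K
instance (scoville : List Int) (K : Int) (out : Int) : Decidable (Spec_solution scoville K out) := by
  unfold Spec_solution; infer_instance

-- ===== CLAIM (what is proved, stated in full; the proofs are below) =====
def Claim_equal_solution : Prop := ∀ (scoville : List Int) (K : Int), Dom_solution scoville K → Pre_solution scoville K → Spec_solution scoville K (solution scoville K)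

-- ===== LEMMAS AND PROOFS =====

-- reference loop on a sorted list (proof-only): pop the two leading minima, reinsert sorted
def insertSorted (s : List Int) (x : Int) : List Int :=
  match s with
  | [] => [x]
  | y :: ys => if y ≤ x then y :: insertSorted ys x else x :: y :: ys

theorem insertSorted_length (s : List Int) (x : Int) :
    (insertSorted s x).length = s.length + 1 := by
  induction s with
  | nil => simp [insertSorted]
  | cons y ys ih => simp only [insertSorted]; split <;> simp_all

def loopC (s : List Int) (K : Int) (c : Int) : Int :=
  match s with
  | [] => if (0 : Int) < K then -1 else c
  | [a] => if a < K then -1 else c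
  | a :: b :: rest => if a < K then loopC (insertSorted rest (a + 2 * b)) K (c + 1) else c
termination_by s.length
decreasing_by simp [insertSorted_length]

theorem popMin_perm : ∀ (l : List Int), l ≠ [] → ((popMin l).1 :: (popMin l).2).Perm l := by
  intro l
  induction l with
  | nil => intro h; exact absurd rfl h
  | cons x xs ih =>
    intro _
    cases xs with
    | nil => simp [popMin]
    | cons y ys =>
      have h2 := ih (by simp)
      simp only [popMin]
      split
      · exact List.Perm.refl _
      · exact (List.Perm.swap _ _ _).trans (h2.cons x)

theorem popMin_min : ∀ (l : List Int), ∀ x ∈ l, (popMin l).1 ≤ x := by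
  intro l
  induction l with
  | nil => intro x hx; simp at hx
  | cons a as ih =>
    intro x hx
    cases as with
    | nil =>
      have hxa : x = a := by simpa using hx
      subst hxa; simp [popMin]
    | cons y ys =>
      simp only [popMin]
      split
      · rename_i hle
        rcases List.mem_cons.mp hx with rfl | hmem
        · exact le_refl x
        · exact le_trans hle (ih x hmem)
      · rename_i hgt
        rcases List.mem_cons.mp hx with rfl | hmem
        · omega
        · exact ih x hmem

theorem minFront_perm (l : List Int) : (minFront l).Perm l := by
  unfold minFront
  split
  · simp_all
  · rename_i h; exact popMin_perm l h

theorem minFront_min (l : List Int) : ∀ x ∈ minFront l, (minFront l).headD 0 ≤ x := by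
  intro x hx
  by_cases h : l = []
  · subst h; simp [minFront] at hx
  · simp only [minFront, if_neg h] at hx ⊢
    simp only [List.headD_cons]
    rcases List.mem_cons.mp hx with h' | h'
    · simp [h']
    · exact popMin_min l x ((popMin_perm l h).mem_iff.mp (List.mem_cons_of_mem _ h'))

theorem insertSorted_perm (s : List Int) (x : Int) : (insertSorted s x).Perm (x :: s) := by
  induction s with
  | nil => simp [insertSorted]
  | cons y ys ih =>
    simp only [insertSorted]
    split
    · exact (ih.cons y).trans (List.Perm.swap _ _ _)
    · exact List.Perm.refl _

theorem insertSorted_pairwise (s : List Int) (x : Int) (hs : s.Pairwise (· ≤ ·)) :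
    (insertSorted s x).Pairwise (· ≤ ·) := by
  induction s with
  | nil => simp [insertSorted]
  | cons y ys ih =>
    rcases List.pairwise_cons.mp hs with ⟨hy, hys⟩
    simp only [insertSorted]
    split
    · rename_i hle
      refine List.pairwise_cons.mpr ⟨?_, ih hys⟩
      intro z hz
      rcases List.mem_cons.mp ((insertSorted_perm ys x).mem_iff.mp hz) with rfl | hmem
      · exact hle
      · exact hy z hmem
    · rename_i hgt
      have hxy : x ≤ y := by omega
      refine List.pairwise_cons.mpr ⟨?_, hs⟩
      intro z hz
      rcases List.mem_cons.mp hz with rfl | hmem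
      · exact hxy
      · exact le_trans hxy (hy z hmem)

-- a head-minimal list and a sorted list that are permutations share their head value
theorem head_eq_of_perm (hh : Int) (ht : List Int) (b : Int) (bt : List Int)
    (hperm : (hh :: ht).Perm (b :: bt)) (hmin : ∀ x ∈ hh :: ht, hh ≤ x)
    (hsort : (b :: bt).Pairwise (· ≤ ·)) : hh = b := by
  have h1 : hh ≤ b := hmin b (hperm.mem_iff.mpr (by simp))
  have h2 : b ≤ hh := by
    have hmem : hh ∈ b :: bt := hperm.mem_iff.mp (by simp)
    rcases List.mem_cons.mp hmem with h | h
    · omega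
    · exact (List.pairwise_cons.mp hsort).1 hh h
  omega

-- A's heap loop equals the reference sorted-list loop
theorem loopAC : ∀ (n : Nat) (h s : List Int) (K c : Int),
    h.length ≤ n → h.Perm s → s.Pairwise (· ≤ ·) →
    (∀ x ∈ h, h.headD 0 ≤ x) → loopA h K c = loopC s K c := by
  intro n
  induction n with
  | zero =>
    intro h s K c hlen hperm _ _
    have h0 : h = [] := List.length_eq_zero_iff.mp (Nat.le_zero.mp hlen)
    subst h0
    have s0 : s = [] := hperm.symm.eq_nil
    subst s0
    rw [loopA]; simp [loopC]
  | succ n ih =>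
    intro h s K c hlen hperm hsort hmin
    match s with
    | [] =>
      have h0 : h = [] := hperm.eq_nil
      subst h0
      rw [loopA]; simp [loopC]
    | [a] =>
      have h0 : h = [a] := List.perm_singleton.mp hperm
      subst h0
      rw [loopA]; simp [loopC]
    | a :: b :: rest =>
      match h with
      | [] => exact absurd hperm.symm.eq_nil (by simp)
      | hh :: ht =>
        have hha : hh = a := head_eq_of_perm hh ht a (b :: rest) hperm (by simpa using hmin) hsort
        subst hha
        have htperm : ht.Perm (b :: rest) := hperm.cons_inv
        have hlen2 : ht.length = rest.length + 1 := by
          have := hperm.length_eq; simp at this; omega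
        rw [loopA]
        simp only [List.headD_cons, loopC]
        by_cases hK : hh < K
        · have hne : ¬ ((hh :: ht).length ≤ 1) := by simp only [List.length_cons]; omega
          rw [if_pos hK, if_pos hK, if_neg hne]
          have htne : ht ≠ [] := by intro e; subst e; simp at hlen2
          have hmf : minFront ht = (popMin ht).1 :: (popMin ht).2 := by
            unfold minFront; rw [if_neg htne]
          have hmfperm : ((popMin ht).1 :: (popMin ht).2).Perm (b :: rest) :=
            hmf ▸ ((minFront_perm ht).trans htperm)
          have hm_eq : (popMin ht).1 = b := by
            refine head_eq_of_perm _ _ _ _ hmfperm ?_ (List.pairwise_cons.mp hsort).2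
            intro x hx
            have := minFront_min ht x (hmf ▸ hx)
            rwa [hmf, List.headD_cons] at this
          have htail_perm : (popMin ht).2.Perm rest := by
            have h' := hmfperm
            rw [hm_eq] at h'
            exact h'.cons_inv
          simp only [heappopA, hmf]
          apply ih
          · rw [heappushA_length, minFront_length]
            have := popMin_length ht htne
            simp only [List.length_cons] at hlen
            omega
          · have p1 : (heappushA (minFront (popMin ht).2) (hh + 2 * (popMin ht).1)).Perm
                ((hh + 2 * (popMin ht).1) :: minFront (popMin ht).2) := minFront_perm _
            have p2 : (minFront (popMin ht).2).Perm rest := (minFront_perm _).trans htail_perm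
            have p3 : ((hh + 2 * (popMin ht).1) :: minFront (popMin ht).2).Perm
                ((hh + 2 * b) :: rest) := by rw [hm_eq]; exact p2.cons _
            exact (p1.trans p3).trans (insertSorted_perm rest (hh + 2 * b)).symm
          · exact insertSorted_pairwise rest _
              (List.pairwise_cons.mp (List.pairwise_cons.mp hsort).2).2
          · exact minFront_min _
        · rw [if_neg hK, if_neg hK]

-- ===== qmin / qpop characterisation =====

theorem qmin_mem (o m : List Int) (h : ¬(o = [] ∧ m = [])) : qmin o m ∈ o ++ m := by
  match o, m with
  | [], [] => exact absurd ⟨rfl, rfl⟩ h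
  | a :: o', [] => simp [qmin]
  | [], b :: m' => simp [qmin]
  | a :: o', b :: m' => simp only [qmin]; split <;> simp

theorem qmin_le (o m : List Int) (ho : o.Pairwise (· ≤ ·)) (hm : m.Pairwise (· ≤ ·)) :
    ∀ y ∈ o ++ m, qmin o m ≤ y := by
  intro y hy
  match o, m with
  | [], [] => simp at hy
  | a :: o', [] =>
    simp only [List.append_nil] at hy
    rcases List.mem_cons.mp hy with rfl | h'
    · simp [qmin]
    · simpa [qmin] using (List.pairwise_cons.mp ho).1 y h'
  | [], b :: m' =>
    simp only [List.nil_append] at hy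
    rcases List.mem_cons.mp hy with rfl | h'
    · simp [qmin]
    · simpa [qmin] using (List.pairwise_cons.mp hm).1 y h'
  | a :: o', b :: m' =>
    have hao : ∀ z ∈ o', a ≤ z := (List.pairwise_cons.mp ho).1
    have hbm : ∀ z ∈ m', b ≤ z := (List.pairwise_cons.mp hm).1
    simp only [qmin]
    rcases List.mem_append.mp hy with h' | h'
    · rcases List.mem_cons.mp h' with rfl | h''
      · split <;> omega
      · have := hao y h''; split <;> omega
    · rcases List.mem_cons.mp h' with rfl | h''
      · split <;> omega
      · have := hbm y h''; split <;> omega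

theorem qpop_fst (o m : List Int) : (qpop o m).1 = qmin o m := by
  match o, m with
  | [], [] => rfl
  | a :: o', [] => rfl
  | [], b :: m' => rfl
  | a :: o', b :: m' => simp only [qpop, qmin]; split <;> rfl

theorem qpop_perm (o m : List Int) (h : ¬(o = [] ∧ m = [])) :
    ((qpop o m).1 :: ((qpop o m).2.1 ++ (qpop o m).2.2)).Perm (o ++ m) := by
  match o, m with
  | [], [] => exact absurd ⟨rfl, rfl⟩ h
  | a :: o', [] => simp [qpop]
  | [], b :: m' => simp [qpop]
  | a :: o', b :: m' =>
    simp only [qpop]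
    split
    · exact List.Perm.refl _
    · exact (List.perm_middle (a := b) (l₁ := a :: o') (l₂ := m')).symm

theorem qpop_o_cases (o m : List Int) : (qpop o m).2.1 = o ∨ (qpop o m).2.1 = o.tail := by
  match o, m with
  | [], [] => right; rfl
  | a :: o', [] => right; rfl
  | [], b :: m' => left; rfl
  | a :: o', b :: m' =>
    simp only [qpop]
    split
    · exact Or.inr rfl
    · exact Or.inl rfl

theorem qpop_m_cases (o m : List Int) : (qpop o m).2.2 = m ∨ (qpop o m).2.2 = m.tail := by
  match o, m with
  | [], [] => left; rfl
  | a :: o', [] => left; rfl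
  | [], b :: m' => right; rfl
  | a :: o', b :: m' =>
    simp only [qpop]
    split
    · exact Or.inl rfl
    · exact Or.inr rfl

theorem pairwise_tail_or_self {l r : List Int} (h : l.Pairwise (· ≤ ·))
    (hc : r = l ∨ r = l.tail) : r.Pairwise (· ≤ ·) := by
  rcases hc with rfl | rfl
  · exact h
  · cases l with
    | nil => simpa using h
    | cons x xs => exact (List.pairwise_cons.mp h).2

theorem mem_of_tail_or_self {l r : List Int} {x : Int} (hc : r = l ∨ r = l.tail)
    (hx : x ∈ r) : x ∈ l := by
  rcases hc with rfl | rfl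
  · exact hx
  · cases l with
    | nil => simpa using hx
    | cons y ys => exact List.mem_cons_of_mem _ hx

-- in the stray-singleton state the made-queue is popped first and emptied
theorem qpop_stray (o : List Int) (x : Int) (h : ∀ y ∈ o, x < y) :
    qpop o [x] = (x, o, []) := by
  cases o with
  | nil => rfl
  | cons y t =>
    have : ¬ y ≤ x := by have := h y (by simp); omega
    simp [qpop, this]

theorem qpop_mnil (o : List Int) : (qpop o []).2.2 = [] := by
  cases o with
  | nil => rfl
  | cons y t => rfl

-- the invariant tying Source B's made-queue to the reference sorted multiset: either every
-- produced value still live is ≤ the next value to be produced (a+2b), or the queue is a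
-- lone value strictly below the whole orig-queue (a transient global minimum)
def InvM (o m s : List Int) : Prop :=
  (∀ x ∈ m, ∀ a b rest, s = a :: b :: rest → x ≤ a + 2 * b)
  ∨ (∃ x, m = [x] ∧ ∀ y ∈ o, x < y)

theorem sorted_head_le {a : Int} {t : List Int} (h : (a :: t).Pairwise (· ≤ ·)) :
    ∀ x ∈ a :: t, a ≤ x := by
  intro x hx
  rcases List.mem_cons.mp hx with rfl | h'
  · exact le_refl x
  · exact (List.pairwise_cons.mp h).1 x h'

theorem qmin_eq_head {o m : List Int} {a : Int} {t : List Int}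
    (ho : o.Pairwise (· ≤ ·)) (hm : m.Pairwise (· ≤ ·))
    (hperm : (o ++ m).Perm (a :: t)) (hs : (a :: t).Pairwise (· ≤ ·)) :
    qmin o m = a := by
  have hne : ¬(o = [] ∧ m = []) := by
    rintro ⟨rfl, rfl⟩; exact absurd hperm.symm.eq_nil (by simp)
  have h1 : qmin o m ≤ a := qmin_le o m ho hm a (hperm.mem_iff.mpr (by simp))
  have h2 : a ≤ qmin o m := sorted_head_le hs _ (hperm.mem_iff.mp (qmin_mem o m hne))
  omega

-- B's two-queue loop equals the reference sorted-list loop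
theorem loopBC : ∀ (n : Nat) (o m s : List Int) (K c : Int),
    o.length + m.length ≤ n →
    o.Pairwise (· ≤ ·) → m.Pairwise (· ≤ ·) → s.Pairwise (· ≤ ·) →
    (o ++ m).Perm s → InvM o m s →
    loopB o m K c = loopC s K c := by
  intro n
  induction n with
  | zero =>
    intro o m s K c hlen _ _ _ hperm _
    have ho : o = [] := by cases o <;> simp_all
    have hm : m = [] := by cases m <;> simp_all
    subst ho; subst hm
    have hs0 : s = [] := hperm.symm.eq_nil
    subst hs0
    rw [loopB]; simp [qmin, loopC]
  | succ n ih =>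
    intro o m s K c hlen ho hm hs hperm hinv
    have hlen_s : o.length + m.length = s.length := by
      have := hperm.length_eq; simpa using this
    match s with
    | [] =>
      have ho0 : o = [] := by
        have := hperm.eq_nil; cases o <;> simp_all
      have hm0 : m = [] := by
        have := hperm.eq_nil; cases m <;> simp_all
      subst ho0; subst hm0
      rw [loopB]; simp [qmin, loopC]
    | [a] =>
      have hq : qmin o m = a := qmin_eq_head ho hm hperm hs
      rw [loopB, hq]
      simp only [loopC]
      by_cases hK : a < K
      · have h1 : o.length + m.length ≤ 1 := by simp at hlen_s; omega
        rw [if_pos hK, if_pos h1, if_pos hK]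
      · rw [if_neg hK, if_neg hK]
    | a :: b :: rest =>
      have hq : qmin o m = a := qmin_eq_head ho hm hperm hs
      have hab : a ≤ b := (List.pairwise_cons.mp hs).1 b (by simp)
      have hs2 : (b :: rest).Pairwise (· ≤ ·) := (List.pairwise_cons.mp hs).2
      have hs3 : rest.Pairwise (· ≤ ·) := (List.pairwise_cons.mp hs2).2
      have hrest_ge_b : ∀ z ∈ rest, b ≤ z := (List.pairwise_cons.mp hs2).1
      rw [loopB, hq]
      simp only [loopC]
      by_cases hK : a < K
      · have hne : ¬(o = [] ∧ m = []) := by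
          rintro ⟨rfl, rfl⟩; simp at hlen_s
        rw [if_pos hK, if_pos hK, if_neg (by simp at hlen_s; omega : ¬ o.length + m.length ≤ 1)]
        -- first pop
        have hp1v : (qpop o m).1 = a := by rw [qpop_fst, hq]
        have hperm1 : ((qpop o m).2.1 ++ (qpop o m).2.2).Perm (b :: rest) := by
          have h1 := qpop_perm o m hne
          rw [hp1v] at h1
          exact (h1.trans hperm).cons_inv
        have ho1 : (qpop o m).2.1.Pairwise (· ≤ ·) :=
          pairwise_tail_or_self ho (qpop_o_cases o m)
        have hm1 : (qpop o m).2.2.Pairwise (· ≤ ·) :=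
          pairwise_tail_or_self hm (qpop_m_cases o m)
        -- second pop
        have hq2 : qmin (qpop o m).2.1 (qpop o m).2.2 = b := qmin_eq_head ho1 hm1 hperm1 hs2
        have hne2 : ¬((qpop o m).2.1 = [] ∧ (qpop o m).2.2 = []) := by
          rintro ⟨h1, h2⟩
          rw [h1, h2] at hperm1
          exact absurd hperm1.symm.eq_nil (by simp)
        have hp2v : (qpop (qpop o m).2.1 (qpop o m).2.2).1 = b := by rw [qpop_fst, hq2]
        have hperm2 :
            ((qpop (qpop o m).2.1 (qpop o m).2.2).2.1 ++
              (qpop (qpop o m).2.1 (qpop o m).2.2).2.2).Perm rest := by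
          have h1 := qpop_perm _ _ hne2
          rw [hp2v] at h1
          exact (h1.trans hperm1).cons_inv
        have ho2 : (qpop (qpop o m).2.1 (qpop o m).2.2).2.1.Pairwise (· ≤ ·) :=
          pairwise_tail_or_self ho1 (qpop_o_cases _ _)
        have hm2 : (qpop (qpop o m).2.1 (qpop o m).2.2).2.2.Pairwise (· ≤ ·) :=
          pairwise_tail_or_self hm1 (qpop_m_cases _ _)
        set o2 := (qpop (qpop o m).2.1 (qpop o m).2.2).2.1 with ho2def
        set m2 := (qpop (qpop o m).2.1 (qpop o m).2.2).2.2 with hm2def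
        have hm2_ge_b : ∀ x ∈ m2, b ≤ x := by
          intro x hx
          exact hrest_ge_b x (hperm2.mem_iff.mp (List.mem_append_right _ hx))
        have ho2_ge_b : ∀ y ∈ o2, b ≤ y := by
          intro y hy
          exact hrest_ge_b y (hperm2.mem_iff.mp (List.mem_append_left _ hy))
        -- every surviving made value is ≤ the value being pushed
        have hm2_le : ∀ x ∈ m2, x ≤ a + 2 * b := by
          rcases hinv with hall | ⟨x0, hmx, hx0lt⟩
          · intro x hx
            have hxm1 : x ∈ (qpop o m).2.2 := mem_of_tail_or_self (qpop_m_cases _ _) hx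
            have hxm : x ∈ m := mem_of_tail_or_self (qpop_m_cases o m) hxm1
            exact hall x hxm a b rest rfl
          · subst hmx
            have hq1 : qpop o [x0] = (x0, o, []) := qpop_stray o x0 hx0lt
            intro x hx
            rw [hm2def, hq1] at hx
            simp only [qpop_mnil] at hx
            simp at hx
        rw [hp1v, hp2v]
        -- apply the induction hypothesis on the reinserted reference list
        apply ih
        · have h2 := hperm2.length_eq
          simp only [List.length_append] at h2
          simp only [List.length_cons] at hlen_s
          simp only [List.length_append, List.length_cons, List.length_nil]
          omega
        · exact ho2
        · refine List.pairwise_append.mpr ⟨hm2, by simp, ?_⟩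
          intro x hx y hy
          simp only [List.mem_singleton] at hy
          subst hy
          exact hm2_le x hx
        · exact insertSorted_pairwise rest _ hs3
        · have e1 : o2 ++ (m2 ++ [a + 2 * b]) = (o2 ++ m2) ++ [a + 2 * b] := by simp
          rw [e1]
          exact ((hperm2.append_right _).trans
            (List.perm_append_singleton _ _)).trans (insertSorted_perm rest _).symm
        · -- re-establish the invariant
          by_cases hbn : b ≤ a + 2 * b
          · left
            intro x hx a' b' rest' hseq
            have hx_le : x ≤ a + 2 * b := by
              rcases List.mem_append.mp hx with h' | h'
              · exact hm2_le x h'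
              · simp only [List.mem_singleton] at h'; omega
            have hmem_ge : ∀ z ∈ insertSorted rest (a + 2 * b), b ≤ z := by
              intro z hz
              rcases List.mem_cons.mp ((insertSorted_perm rest _).mem_iff.mp hz) with rfl | h'
              · exact hbn
              · exact hrest_ge_b z h'
            have ha' : b ≤ a' := hmem_ge a' (by rw [hseq]; simp)
            have hb' : b ≤ b' := hmem_ge b' (by rw [hseq]; simp)
            omega
          · right
            have hm2nil : m2 = [] := by
              cases hmm : m2 with
              | nil => rfl
              | cons z zs =>
                have h1 := hm2_ge_b z (by rw [hmm]; simp)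
                have h2 := hm2_le z (by rw [hmm]; simp)
                omega
            refine ⟨a + 2 * b, by rw [hm2nil]; rfl, ?_⟩
            intro y hy
            have := ho2_ge_b y hy
            omega
      · rw [if_neg hK, if_neg hK]

-- ===== VERDICT (by name: the statement is the Claim_ definition above) =====
theorem solution_spec : Claim_equal_solution := by
  intro scoville K _dom _pre
  unfold Spec_solution solution solution_alt
  have hsorted : (PySem.List.sorted scoville (fun x => x) false).Pairwise (· ≤ ·) := by
    have := PySem.List.sorted_pairwise (xs := scoville) (key := fun x => x)
    simpa using this
  have hperm := (PySem.List.sorted_perm scoville (fun x => x) false)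
  rw [loopAC scoville.length (minFront scoville) (PySem.List.sorted scoville (fun x => x) false)
      K 0 (by simp [minFront_length]) ((minFront_perm scoville).trans hperm.symm) hsorted
      (minFront_min _)]
  exact (loopBC (scoville.length) _ [] _ K 0 (by simpa using hperm.symm.length_eq.ge)
      hsorted (by simp) hsorted (by simpa using List.Perm.refl _) (Or.inl (by simp))).symm
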